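-- pv_equiv track=rewrite | github.com/ayushga8/Solution-Challenge---google | core/analysis.py | detect_protected_attributes
-- ===== SOURCE A (Python) =====
-- PROTECTED_KEYWORDS = [
--     'gender', 'sex', 'race', 'ethnicity', 'ethnic', 'age', 'religion',
--     'disability', 'marital', 'married', 'nationality', 'national_origin',
--     'skin', 'color', 'colour', 'orientation', 'pregnant', 'veteran',
--     'citizen', 'immigration', 'language', 'caste', 'tribe', 'indigenous',
-- ]
--
-- def detect_protected_attributes(columns):
--     """Auto-detect columns that likely represent protected attributes."""
--     protected = []
--     for col in columns:
--         col_lower = col.lower().strip().replace(' ', '_')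
--         for keyword in PROTECTED_KEYWORDS:
--             if keyword in col_lower:
--                 protected.append(col)
--                 break
--     return protected
-- ===== SOURCE B (Python) =====
-- PROTECTED_KEYWORDS = [
--     'gender', 'sex', 'race', 'ethnicity', 'ethnic', 'age', 'religion',
--     'disability', 'marital', 'married', 'nationality', 'national_origin',
--     'skin', 'color', 'colour', 'orientation', 'pregnant', 'veteran',
--     'citizen', 'immigration', 'language', 'caste', 'tribe', 'indigenous',
-- ]
--
-- # keywords indexed by first character, built once at module load
-- _BY_FIRST = {}
-- for _kw in PROTECTED_KEYWORDS:
--     _BY_FIRST.setdefault(_kw[0], []).append(_kw)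
--
--
-- def _hit(norm):
--     # position-major scan: at each position, try only the keywords starting with that character
--     for i, c in enumerate(norm):
--         for kw in _BY_FIRST.get(c, []):
--             if norm.startswith(kw, i):
--                 return True
--     return False
--
--
-- def detect_protected_attributes(columns):
--     """Auto-detect columns that likely represent protected attributes."""
--     return [col for col in columns
--             if _hit(col.lower().strip().replace(' ', '_'))]
-- ===== Notes on version B (the rewrite author's own statement) =====
-- stated objective: alternative
-- what changed: Replaces the keyword-major loop using Python's substring operator with a position-major scan of the normalized name driven by a first-character dispatch dict (built once at module load), trying startswith only for keywords that begin with the character at each position, and builds the result as a filter comprehension instead of append-with-break.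
import Mathlib
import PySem

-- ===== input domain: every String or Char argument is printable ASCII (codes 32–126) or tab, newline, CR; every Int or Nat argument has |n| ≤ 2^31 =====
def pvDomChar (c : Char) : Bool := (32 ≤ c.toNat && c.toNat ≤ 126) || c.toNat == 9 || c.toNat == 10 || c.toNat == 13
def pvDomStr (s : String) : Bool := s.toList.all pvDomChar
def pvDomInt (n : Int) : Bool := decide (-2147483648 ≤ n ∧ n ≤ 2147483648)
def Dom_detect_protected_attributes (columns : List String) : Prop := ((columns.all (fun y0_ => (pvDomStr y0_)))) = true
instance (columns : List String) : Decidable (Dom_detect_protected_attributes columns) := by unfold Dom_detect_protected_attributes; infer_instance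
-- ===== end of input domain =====

-- ===== PORT A =====
-- B replaces A's keyword-major substring loop with a position-major scan dispatched by a
-- first-character table and a filter; objective: alternative (comparable cost, not claimed faster).
def PROTECTED_KEYWORDS : List String :=
  ["gender", "sex", "race", "ethnicity", "ethnic", "age", "religion",
   "disability", "marital", "married", "nationality", "national_origin",
   "skin", "color", "colour", "orientation", "pregnant", "veteran",
   "citizen", "immigration", "language", "caste", "tribe", "indigenous"]

-- inner 'for keyword in PROTECTED_KEYWORDS: if keyword in col_lower: ... break'
def pvMatchA : List String → String → Bool
  | [], _ => false
  | kw :: rest, s => if PySem.Str.isIn kw s then true else pvMatchA rest s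

def detect_protected_attributes (columns : List String) : List String :=
  columns.foldl (fun prot col =>
    let col_lower := PySem.Str.replace (PySem.Str.strip (PySem.Str.lower col)) " " "_"
    if pvMatchA PROTECTED_KEYWORDS col_lower then prot ++ [col] else prot) []

-- ===== PORT B =====
-- module-load build of _BY_FIRST: setdefault(kw[0], []).append(kw) transliterated as
-- insert of (group so far) ++ [kw]; kw[0] on the (nonempty) literal keywords is headD
def pvByFirst : PySem.Dict Char (List String) :=
  PROTECTED_KEYWORDS.foldl
    (fun d kw => d.insert (kw.toList.headD ' ') (d.getD (kw.toList.headD ' ') [] ++ [kw]))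
    PySem.Dict.empty

-- Source B's _hit: position-major scan; only the keywords starting with the character at that
-- position are tried; norm.startswith(kw, i) is ported as startswith on norm.drop i
-- (exact here: enumerate's indices are 0 ≤ i < len)
def pvHit (norm : List Char) : Bool :=
  (PySem.List.enumerate norm).any (fun ic =>
    (pvByFirst.getD ic.2 []).any (fun kw => PySem.Chars.startswith (norm.drop ic.1.toNat) kw.toList))

def detect_protected_attributes_alt (columns : List String) : List String :=
  columns.filter (fun col =>
    pvHit (PySem.Chars.replace (PySem.Chars.strip (PySem.Chars.lower col.toList))
      " ".toList "_".toList))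

-- ===== PRECONDITION & SPEC =====
def Spec_detect_protected_attributes (columns : List String) (out : List String) : Prop := out = detect_protected_attributes_alt columns
instance (columns : List String) (out : List String) : Decidable (Spec_detect_protected_attributes columns out) := by unfold Spec_detect_protected_attributes; infer_instance

-- ===== CLAIM (what is proved, stated in full; the proofs are below) =====
def Claim_equal_detect_protected_attributes : Prop := ∀ (columns : List String), Dom_detect_protected_attributes columns → Spec_detect_protected_attributes columns (detect_protected_attributes columns)

-- ===== LEMMAS AND PROOFS =====

-- no keyword is empty, so a keyword that is a prefix of norm.drop j forces j < norm.length
theorem pv_kw_ne_nil : ∀ kw ∈ PROTECTED_KEYWORDS, kw.toList ≠ [] := by decide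

-- A's inner loop is an 'any' over the keyword list
theorem pvMatchA_eq_any (l : List String) (s : String) :
    pvMatchA l s = l.any (fun kw => PySem.Chars.isIn kw.toList s.toList) := by
  induction l with
  | nil => rfl
  | cons kw rest ih => simp [pvMatchA, List.any_cons, ih, PySem.Str.isIn_eq]

-- every keyword is in its first-character group of the dispatch table
theorem pv_mem_group : ∀ kw ∈ PROTECTED_KEYWORDS,
    kw ∈ pvByFirst.getD (kw.toList.headD ' ') [] := by decide

-- the dispatch table, evaluated (the fold over the 24 literal keywords)
def pvByFirstList : List (Char × List String) :=
  [('g', ["gender"]), ('s', ["sex", "skin"]), ('r', ["race", "religion"]),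
   ('e', ["ethnicity", "ethnic"]), ('a', ["age"]), ('d', ["disability"]),
   ('m', ["marital", "married"]), ('n', ["nationality", "national_origin"]),
   ('c', ["color", "colour", "citizen", "caste"]), ('o', ["orientation"]),
   ('p', ["pregnant"]), ('v', ["veteran"]), ('i', ["immigration", "indigenous"]),
   ('l', ["language"]), ('t', ["tribe"])]

set_option maxHeartbeats 1000000 in
theorem pv_byFirst_eq : pvByFirst = PySem.Dict.mk pvByFirstList := by decide

-- a successful lookup in a literal dict returns one of its stored values
theorem get?_mk_mem : ∀ (L : List (Char × List String)) (c : Char) (v : List String),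
    (PySem.Dict.mk L).get? c = some v → v ∈ L.map Prod.snd := by
  intro L
  induction L with
  | nil => intro c v h; simp [PySem.Dict.get?] at h
  | cons p rest ih =>
    intro c v h
    rw [show PySem.Dict.mk (p :: rest) = PySem.Dict.mk ((p.1, p.2) :: rest) from rfl,
      PySem.Dict.get?_mk_cons] at h
    by_cases hc : p.1 == c
    · simp [hc] at h; simp [← h]
    · simp [hc] at h; simpa using Or.inr (ih c v h)

-- every member of any group of the dispatch table is a keyword
theorem pv_group_sub (c : Char) (kw : String) (h : kw ∈ pvByFirst.getD c []) :
    kw ∈ PROTECTED_KEYWORDS := by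
  rw [PySem.Dict.getD_eq_get?_getD] at h
  cases hv : pvByFirst.get? c with
  | none => rw [hv] at h; simp at h
  | some v =>
    rw [hv] at h; simp at h
    have hm := get?_mk_mem pvByFirstList c v (by rw [← pv_byFirst_eq]; exact hv)
    have hall : ∀ v' ∈ pvByFirstList.map Prod.snd, ∀ kw' ∈ v', kw' ∈ PROTECTED_KEYWORDS := by
      decide
    exact hall v hm kw h

-- keyword-major containment = position-major first-char-dispatched scan
theorem pv_any_eq_hit (norm : List Char) :
    PROTECTED_KEYWORDS.any (fun kw => PySem.Chars.isIn kw.toList norm) = pvHit norm := by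
  apply Bool.eq_iff_iff.mpr
  simp only [pvHit, List.any_eq_true, PySem.List.mem_enumerate_iff,
    PySem.Chars.startswith_iff]
  constructor
  · rintro ⟨kw, hkw, hin⟩
    obtain ⟨j, hj⟩ := (PySem.Chars.exists_prefix_drop_iff_isIn kw.toList norm).mpr hin
    have hne := pv_kw_ne_nil kw hkw
    have hjlt : j < norm.length := by
      by_contra h
      rw [List.drop_eq_nil_of_le (le_of_not_gt h)] at hj
      exact hne (List.prefix_nil.mp hj)
    have hhead : norm[j] = kw.toList.headD ' ' := by
      obtain ⟨r, hr⟩ := hj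
      obtain ⟨c, cs, hc⟩ := List.exists_cons_of_ne_nil hne
      have : norm.drop j = c :: (cs ++ r) := by rw [← hr, hc]; simp
      have h9 : norm[j]? = some c := by
        rw [← List.head?_drop, this]; rfl
      simp [List.getElem?_eq_getElem hjlt] at h9
      simp [h9, hc]
    refine ⟨⟨(j : Int), norm[j]⟩, ⟨j, hjlt, by simp⟩, kw, ?_, ?_⟩
    · rw [hhead]; exact pv_mem_group kw hkw
    · simpa using hj
  · rintro ⟨ic, ⟨k, hk, hik⟩, kw, hgrp, hpre⟩
    refine ⟨kw, pv_group_sub _ _ (by rw [hik] at hgrp; exact hgrp), ?_⟩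
    exact (PySem.Chars.exists_prefix_drop_iff_isIn kw.toList norm).mp ⟨_, hpre⟩

-- per-column predicates of the two ports agree
theorem pv_pred_eq (col : String) :
    pvMatchA PROTECTED_KEYWORDS (PySem.Str.replace (PySem.Str.strip (PySem.Str.lower col)) " " "_") =
    pvHit (PySem.Chars.replace (PySem.Chars.strip (PySem.Chars.lower col.toList)) " ".toList "_".toList) := by
  rw [pvMatchA_eq_any]
  have hbridge : (PySem.Str.replace (PySem.Str.strip (PySem.Str.lower col)) " " "_").toList =
      PySem.Chars.replace (PySem.Chars.strip (PySem.Chars.lower col.toList)) " ".toList "_".toList := by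
    simp [PySem.Str.toList_replace, PySem.Str.toList_strip, PySem.Str.toList_lower]
  rw [hbridge, pv_any_eq_hit]

-- ===== VERDICT (by name: the statement is the Claim_ definition above) =====
theorem detect_protected_attributes_spec : Claim_equal_detect_protected_attributes := by
  intro columns _
  show detect_protected_attributes columns = detect_protected_attributes_alt columns
  have h := PySem.List.foldl_append_if
      (fun col => pvMatchA PROTECTED_KEYWORDS
        (PySem.Str.replace (PySem.Str.strip (PySem.Str.lower col)) " " "_"))
      (fun c : String => c) columns []
  unfold detect_protected_attributes detect_protected_attributes_alt
  refine Eq.trans h ?_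
  simp only [List.nil_append, List.map_id']
  exact List.filter_congr (fun col _ => pv_pred_eq col)
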